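-- pv_equiv track=rewrite | github.com/NeilAmratia/MasterThesis | yasa_2.0.py | run_coverage_analysis
-- ===== SOURCE A (Python) =====
-- def run_coverage_analysis(completed_configurations, t_wise_interations):
--
--     #First transform all configs and interactions into set for easier coverage analysis
--     completed_configurations_set = [set(x) for x in completed_configurations]
--     t_wise_interations_set = [set(x) for x in t_wise_interations]
--
--     for configs in completed_configurations_set:
--         for interaction in t_wise_interations_set[:]:  # Use slice to copy list
--             # Check if interaction is a subset of the current configuration
--             if interaction.issubset(configs):
--                 t_wise_interations_set.remove(interaction)  # Remove the covered interaction
--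
--     return len(t_wise_interations_set)
-- ===== SOURCE B (Python) =====
-- def run_coverage_analysis(completed_configurations, t_wise_interations):
--     # Inverted index: feature -> set of ids of configurations containing it.
--     index = {}
--     for i, config in enumerate(completed_configurations):
--         for feature in config:
--             index.setdefault(feature, set()).add(i)
--     all_ids = set(range(len(completed_configurations)))
--     uncovered = 0
--     for interaction in t_wise_interations:
--         covering = all_ids
--         for feature in interaction:
--             covering = covering & index.get(feature, set())
--             if not covering:
--                 break
--         if not covering:
--             uncovered += 1
--     return uncovered
-- ===== Notes on version B (the rewrite author's own statement) =====
-- stated objective: alternative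
-- what changed: Replaces A's nested scan of every interaction against every configuration (with repeated list.remove passes on a shrinking list) by an inverted feature-to-config-ids index built once; each interaction is then classified by intersecting the id-sets of its features in a single counting pass.
import Mathlib
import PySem

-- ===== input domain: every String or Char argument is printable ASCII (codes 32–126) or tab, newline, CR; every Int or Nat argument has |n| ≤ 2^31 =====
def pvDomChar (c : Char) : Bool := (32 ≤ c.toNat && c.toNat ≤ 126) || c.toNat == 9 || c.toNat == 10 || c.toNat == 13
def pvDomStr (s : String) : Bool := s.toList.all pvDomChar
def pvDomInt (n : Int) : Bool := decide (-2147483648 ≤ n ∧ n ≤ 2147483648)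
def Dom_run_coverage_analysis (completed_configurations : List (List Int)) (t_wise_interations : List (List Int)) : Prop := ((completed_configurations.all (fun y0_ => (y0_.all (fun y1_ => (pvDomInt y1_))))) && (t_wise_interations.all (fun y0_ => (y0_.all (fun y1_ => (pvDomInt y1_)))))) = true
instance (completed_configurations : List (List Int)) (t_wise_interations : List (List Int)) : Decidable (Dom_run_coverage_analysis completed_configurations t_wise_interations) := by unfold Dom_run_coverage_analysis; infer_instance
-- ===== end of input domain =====

-- B replaces A's repeated subset-scan-with-removal by an inverted feature→config-ids index
-- and one counting pass over the interactions (objective: alternative algorithm, same result).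


-- ===== PORT A =====
-- Python list.remove on a list of sets compares with `==`, i.e. set equality PySem.Set.equal;
-- exact by-hand port (the ValueError branch of list.remove is unreachable in A because the
-- removed element was taken from a snapshot of the very list it is removed from).
def pvRemoveEq : List (PySem.Set Int) → PySem.Set Int → List (PySem.Set Int)
  | [], _ => []
  | x :: xs, s => if PySem.Set.equal x s then xs else x :: pvRemoveEq xs s

def run_coverage_analysis (completed_configurations : List (List Int)) (t_wise_interations : List (List Int)) : Int :=
  let completed_configurations_set := completed_configurations.map (fun x => PySem.Set.ofList x)
  let t_wise_interations_set := t_wise_interations.map (fun x => PySem.Set.ofList x)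
  -- for configs in …: for interaction in t_wise_interations_set[:]: the inner loop iterates
  -- over a snapshot (the fold's list) while the accumulator is the shrinking list itself.
  let final := completed_configurations_set.foldl
    (fun acc configs =>
      acc.foldl
        (fun cur interaction =>
          if PySem.Set.issubset interaction configs then pvRemoveEq cur interaction else cur)
        acc)
    t_wise_interations_set
  (final.length : Int)

-- ===== PORT B =====
-- `for feature in interaction: covering &= index.get(feature, set()); if not covering: break`
def pvCoverLoop (index : PySem.Dict Int (PySem.Set Int)) : PySem.Set Int → List Int → PySem.Set Int
  | covering, [] => covering
  | covering, f :: rest =>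
      let c := PySem.Set.inter covering (index.getD f PySem.Set.empty)
      if PySem.Set.len c = 0 then c else pvCoverLoop index c rest

def run_coverage_analysis_alt (completed_configurations : List (List Int)) (t_wise_interations : List (List Int)) : Int :=
  -- index = {}; for i, config in enumerate(…): for feature in config: index.setdefault(feature, set()).add(i)
  let index : PySem.Dict Int (PySem.Set Int) :=
    (PySem.List.enumerate completed_configurations 0).foldl
      (fun d p => p.2.foldl
        (fun d f => d.modify f PySem.Set.empty (fun s => PySem.Set.add s p.1)) d)
      PySem.Dict.empty
  let all_ids : PySem.Set Int :=
    PySem.Set.ofList (PySem.List.pyRange 0 (completed_configurations.length : Int) 1)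
  t_wise_interations.foldl
    (fun uncovered interaction =>
      if PySem.Set.len (pvCoverLoop index all_ids interaction) = 0 then uncovered + 1 else uncovered)
    0

-- ===== PRECONDITION & SPEC =====
def Spec_run_coverage_analysis (completed_configurations : List (List Int)) (t_wise_interations : List (List Int)) (out : Int) : Prop := out = run_coverage_analysis_alt completed_configurations t_wise_interations
instance (completed_configurations : List (List Int)) (t_wise_interations : List (List Int)) (out : Int) : Decidable (Spec_run_coverage_analysis completed_configurations t_wise_interations out) := by unfold Spec_run_coverage_analysis; infer_instance

-- ===== CLAIM (what is proved, stated in full; the proofs are below) =====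
def Claim_equal_run_coverage_analysis : Prop := ∀ (completed_configurations : List (List Int)) (t_wise_interations : List (List Int)), Dom_run_coverage_analysis completed_configurations t_wise_interations → Spec_run_coverage_analysis completed_configurations t_wise_interations (run_coverage_analysis completed_configurations t_wise_interations)

-- ===== LEMMAS AND PROOFS =====

-- set equality respects the subset test
theorem pv_equal_issubset (a b c : PySem.Set Int) (h : PySem.Set.equal a b = true) :
    PySem.Set.issubset a c = PySem.Set.issubset b c := by
  rw [Bool.eq_iff_iff, PySem.Set.issubset_iff, PySem.Set.issubset_iff]
  rw [PySem.Set.equal_iff] at h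
  constructor
  · intro hs x hx; exact hs x ((h x).mpr hx)
  · intro hs x hx; exact hs x ((h x).mp hx)

theorem pv_equal_refl (s : PySem.Set Int) : PySem.Set.equal s s = true := by
  rw [PySem.Set.equal_iff]; intro x; rfl

theorem pvRemoveEq_append (ds ys : List (PySem.Set Int)) (s : PySem.Set Int)
    (h : ∀ d ∈ ds, PySem.Set.equal d s = false) :
    pvRemoveEq (ds ++ s :: ys) s = ds ++ ys := by
  induction ds with
  | nil => simp [pvRemoveEq, pv_equal_refl]
  | cons d ds ih =>
      have hd : PySem.Set.equal d s = false := h d (by simp)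
      simp only [List.cons_append, pvRemoveEq, hd]
      rw [ih (fun x hx => h x (by simp [hx]))]
      simp

-- one pass of A over one configuration filters out the covered interactions
theorem pv_pass (c : PySem.Set Int) (ys ds : List (PySem.Set Int))
    (h : ∀ d ∈ ds, PySem.Set.issubset d c = false) :
    ys.foldl (fun cur x => if PySem.Set.issubset x c then pvRemoveEq cur x else cur) (ds ++ ys)
      = ds ++ ys.filter (fun x => ! PySem.Set.issubset x c) := by
  induction ys generalizing ds with
  | nil => simp
  | cons s ys ih =>
      by_cases hs : PySem.Set.issubset s c = true
      · have hne : ∀ d ∈ ds, PySem.Set.equal d s = false := by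
          intro d hd
          by_contra hc
          have : PySem.Set.equal d s = true := by
            cases hcc : PySem.Set.equal d s
            · exact absurd hcc hc
            · rfl
          have := pv_equal_issubset d s c this
          rw [hs, h d hd] at this; exact absurd this (by simp)
        simp only [List.foldl_cons, if_pos hs, pvRemoveEq_append ds ys s hne]
        rw [ih ds h]
        simp [hs]
      · have hs' : PySem.Set.issubset s c = false := by
          cases hcc : PySem.Set.issubset s c
          · rfl
          · exact absurd hcc hs
        simp only [List.foldl_cons, if_neg hs]
        have : ds ++ s :: ys = (ds ++ [s]) ++ ys := by simp
        rw [this, ih (ds ++ [s]) (by intro d hd; rcases List.mem_append.mp hd with h1 | h1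
                                     · exact h d h1
                                     · simp at h1; subst h1; exact hs')]
        simp [hs']

-- the full double loop of A is a filter by "not covered by any configuration"
theorem pv_A_loop (ccs xs : List (PySem.Set Int)) :
    ccs.foldl (fun acc configs =>
        acc.foldl (fun cur x => if PySem.Set.issubset x configs then pvRemoveEq cur x else cur) acc) xs
      = xs.filter (fun x => ccs.all (fun c => ! PySem.Set.issubset x c)) := by
  induction ccs generalizing xs with
  | nil => simp
  | cons c ccs ih =>
      simp only [List.foldl_cons]
      have h0 := pv_pass c xs [] (by intro d hd; simp at hd)
      simp only [List.nil_append] at h0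
      rw [h0, ih, List.filter_filter]
      apply List.filter_congr
      intro x _
      simp [Bool.and_comm]

-- B-side: membership in the dict built by the inner loop over one configuration
theorem pv_index_inner (config : List Int) (k : Int) (d : PySem.Dict Int (PySem.Set Int))
    (g v : Int) :
    (v ∈ (config.foldl (fun d f => d.modify f PySem.Set.empty (fun s => PySem.Set.add s k)) d).getD g PySem.Set.empty
      ↔ v ∈ d.getD g PySem.Set.empty ∨ (v = k ∧ g ∈ config)) := by
  induction config generalizing d with
  | nil => simp
  | cons f rest ih =>
      simp only [List.foldl_cons]
      rw [ih]
      by_cases hgf : g = f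
      · subst hgf
        rw [PySem.Dict.getD_modify_self, PySem.Set.mem_add]
        constructor
        · rintro (⟨h | h⟩ | ⟨h1, h2⟩)
          · exact Or.inl h
          · exact Or.inr ⟨h, by simp⟩
          · exact Or.inr ⟨h1, by simp [h2]⟩
        · rintro (h | ⟨h1, _⟩)
          · exact Or.inl (Or.inl h)
          · exact Or.inl (Or.inr h1)
      · rw [PySem.Dict.getD_modify_of_ne _ _ _ hgf]
        constructor
        · rintro (h | ⟨h1, h2⟩)
          · exact Or.inl h
          · exact Or.inr ⟨h1, by simp [h2]⟩
        · rintro (h | ⟨h1, h2⟩)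
          · exact Or.inl h
          · rcases List.mem_cons.mp h2 with h3 | h3
            · exact absurd h3 hgf
            · exact Or.inr ⟨h1, h3⟩

-- membership in the full index
theorem pv_index_outer (l : List (Int × List Int)) (d : PySem.Dict Int (PySem.Set Int)) (g v : Int) :
    (v ∈ (l.foldl (fun d p => p.2.foldl
            (fun d f => d.modify f PySem.Set.empty (fun s => PySem.Set.add s p.1)) d) d).getD g PySem.Set.empty
      ↔ v ∈ d.getD g PySem.Set.empty ∨ ∃ p ∈ l, v = p.1 ∧ g ∈ p.2) := by
  induction l generalizing d with
  | nil => simp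
  | cons p l ih =>
      simp only [List.foldl_cons]
      rw [ih, pv_index_inner]
      constructor
      · rintro (⟨h | h⟩ | ⟨q, hq, h⟩)
        · exact Or.inl h
        · exact Or.inr ⟨p, by simp, h⟩
        · exact Or.inr ⟨q, by simp [hq], h⟩
      · rintro (h | ⟨q, hq, h⟩)
        · exact Or.inl (Or.inl h)
        · rcases List.mem_cons.mp hq with h1 | h1
          · subst h1; exact Or.inl (Or.inr h)
          · exact Or.inr ⟨q, h1, h⟩

-- membership in the result of B's intersection loop
theorem pv_len_zero {s : PySem.Set Int} : PySem.Set.len s = 0 ↔ s = [] := by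
  simp [PySem.Set.len, List.length_eq_zero_iff]

theorem pv_coverLoop_mem (index : PySem.Dict Int (PySem.Set Int)) (feats : List Int)
    (covering : PySem.Set Int) (i : Int) :
    (i ∈ pvCoverLoop index covering feats
      ↔ i ∈ covering ∧ ∀ f ∈ feats, i ∈ index.getD f PySem.Set.empty) := by
  induction feats generalizing covering with
  | nil => simp [pvCoverLoop]
  | cons f rest ih =>
      simp only [pvCoverLoop]
      by_cases hl : PySem.Set.len (PySem.Set.inter covering (index.getD f PySem.Set.empty)) = 0
      · rw [if_pos hl]
        have hnil : PySem.Set.inter covering (index.getD f PySem.Set.empty) = [] :=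
          pv_len_zero.mp hl
        constructor
        · intro h; rw [hnil] at h; exact absurd h (List.not_mem_nil)
        · rintro ⟨h1, h2⟩
          have : i ∈ PySem.Set.inter covering (index.getD f PySem.Set.empty) :=
            (PySem.Set.mem_inter _ _ _).mpr ⟨h1, h2 f (by simp)⟩
          rw [hnil] at this; exact absurd this (List.not_mem_nil)
      · rw [if_neg hl, ih, PySem.Set.mem_inter]  -- placeholder
        constructor
        · rintro ⟨⟨h1, h2⟩, h3⟩
          exact ⟨h1, by intro x hx; rcases List.mem_cons.mp hx with h | h
                        · subst h; exact h2
                        · exact h3 x h⟩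
        · rintro ⟨h1, h2⟩
          exact ⟨⟨h1, h2 f (by simp)⟩, fun x hx => h2 x (by simp [hx])⟩

-- for each interaction, B's emptiness test agrees with A's "covered by no configuration"
theorem pv_point (cc : List (List Int)) (x : List Int) :
    ((PySem.Set.len (pvCoverLoop
        ((PySem.List.enumerate cc 0).foldl
          (fun d p => p.2.foldl
            (fun d f => d.modify f PySem.Set.empty (fun s => PySem.Set.add s p.1)) d)
          PySem.Dict.empty)
        (PySem.Set.ofList (PySem.List.pyRange 0 (cc.length : Int) 1)) x) = 0)
      ↔ ((cc.map (fun y => PySem.Set.ofList y)).all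
            (fun c => ! PySem.Set.issubset (PySem.Set.ofList x) c)) = true) := by
  rw [pv_len_zero, List.eq_nil_iff_forall_not_mem]
  constructor
  · -- no config id survives the intersection ⇒ no configuration covers x
    intro hL
    rw [List.all_map, List.all_eq_true]
    intro c hc
    rcases List.mem_iff_getElem.mp hc with ⟨j, hj, hcj⟩
    simp only [Function.comp, Bool.not_eq_eq_eq_not, Bool.not_true,
      ← Bool.not_eq_true, PySem.Set.issubset_iff]
    intro hsub
    apply hL (j : Int)
    rw [pv_coverLoop_mem]
    constructor
    · rw [PySem.Set.mem_ofList, PySem.List.mem_pyRange_one]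
      exact ⟨Int.natCast_nonneg j, by exact_mod_cast hj⟩
    · intro f hf
      rw [pv_index_outer]
      refine Or.inr ⟨((j : Int), cc[j]), ?_, rfl, ?_⟩
      · rw [PySem.List.mem_enumerate_iff]
        exact ⟨j, hj, by simp⟩
      · have : f ∈ PySem.Set.ofList x := (PySem.Set.mem_ofList _ _).mpr hf
        have := hsub f this
        rw [PySem.Set.mem_ofList] at this
        rw [hcj]; exact this
  · -- no configuration covers x ⇒ no config id survives
    intro hR i hi
    rw [pv_coverLoop_mem] at hi
    obtain ⟨hmem, hall⟩ := hi
    rw [PySem.Set.mem_ofList, PySem.List.mem_pyRange_one] at hmem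
    obtain ⟨h0, h1⟩ := hmem
    have hjlt : i.toNat < cc.length := by omega
    have hc : cc[i.toNat] ∈ cc := List.getElem_mem hjlt
    rw [List.all_map, List.all_eq_true] at hR
    have := hR _ hc
    simp only [Function.comp, Bool.not_eq_eq_eq_not, Bool.not_true,
      ← Bool.not_eq_true, PySem.Set.issubset_iff] at this
    apply this
    intro f hf
    rw [PySem.Set.mem_ofList] at hf ⊢
    have h2 := hall f hf
    rw [pv_index_outer] at h2
    rcases h2 with h2 | ⟨p, hp, hip, hfp⟩
    · exact absurd h2 (List.not_mem_nil)
    · rw [PySem.List.mem_enumerate_iff] at hp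
      obtain ⟨k, hk, hpk⟩ := hp
      subst hpk
      simp only [zero_add] at hip hfp
      have hik : i.toNat = k := by omega
      subst hik
      exact hfp

theorem run_coverage_analysis_spec₀ : Claim_equal_run_coverage_analysis := by
  intro cc tw _
  unfold Spec_run_coverage_analysis run_coverage_analysis run_coverage_analysis_alt
  simp only []
  rw [pv_A_loop, PySem.List.foldl_ite_add_one, ← List.countP_eq_length_filter, List.countP_map]
  rw [List.countP_congr (q := fun x => decide (PySem.Set.len (pvCoverLoop
        ((PySem.List.enumerate cc 0).foldl
          (fun d p => p.2.foldl
            (fun d f => d.modify f PySem.Set.empty (fun s => PySem.Set.add s p.1)) d)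
          PySem.Dict.empty)
        (PySem.Set.ofList (PySem.List.pyRange 0 (cc.length : Int) 1)) x) = 0))
      (by intro x _
          simp only [Function.comp, decide_eq_true_iff]
          exact (pv_point cc x).symm)]
  ring

-- ===== VERDICT (by name: the statement is the Claim_ definition above) =====
theorem run_coverage_analysis_spec : Claim_equal_run_coverage_analysis :=
  run_coverage_analysis_spec₀
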